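-- pv_equiv track=rewrite | github.com/subhagakannan/ESD_Project | Lane Detection/Lane_Detection_Prototype_2.py | FindLeftRight
-- ===== SOURCE A (Python) =====
-- def FindLeftRight(DistanceArray):
--     DistPos = []
--     DistNeg = []
--     for Dist in DistanceArray:
--         if(Dist>0):
--             DistPos.append(Dist)
--         else:
--             DistNeg.append(Dist)
--     if DistNeg :
--         RightLaneIdx = DistanceArray.index(max(DistNeg))
--     else:
--         RightLaneIdx =None
--     if DistPos :
--         LeftLaneIdx = DistanceArray.index(min(DistPos))
--     else:
--         LeftLaneIdx = None
--     return LeftLaneIdx,RightLaneIdx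
-- ===== SOURCE B (Python) =====
-- def FindLeftRight(DistanceArray):
--     best_pos = None  # (value, index) of smallest positive distance, first occurrence
--     best_neg = None  # (value, index) of largest non-positive distance, first occurrence
--     for i, d in enumerate(DistanceArray):
--         if d > 0:
--             if best_pos is None or d < best_pos[0]:
--                 best_pos = (d, i)
--         else:
--             if best_neg is None or d > best_neg[0]:
--                 best_neg = (d, i)
--     LeftLaneIdx = best_pos[1] if best_pos is not None else None
--     RightLaneIdx = best_neg[1] if best_neg is not None else None
--     return LeftLaneIdx, RightLaneIdx
-- ===== Notes on version B (the rewrite author's own statement) =====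
-- stated objective: simpler
-- what changed: One enumerate pass maintaining (value,index) bests with strict comparisons replaces the partition into two lists plus max/min plus .index rescans of the original array.
import Mathlib
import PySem

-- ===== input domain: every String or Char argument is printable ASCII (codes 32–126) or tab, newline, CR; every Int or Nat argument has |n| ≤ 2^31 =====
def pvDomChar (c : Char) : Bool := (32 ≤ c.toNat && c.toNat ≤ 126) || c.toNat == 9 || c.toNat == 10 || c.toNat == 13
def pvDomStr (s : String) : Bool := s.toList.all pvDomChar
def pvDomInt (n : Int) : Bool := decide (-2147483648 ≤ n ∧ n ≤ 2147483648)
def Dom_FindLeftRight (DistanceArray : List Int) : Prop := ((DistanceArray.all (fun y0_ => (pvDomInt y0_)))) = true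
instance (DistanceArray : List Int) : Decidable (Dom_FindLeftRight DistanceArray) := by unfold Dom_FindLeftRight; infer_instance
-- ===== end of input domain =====

-- B replaces A's partition-into-two-lists + max/min + .index rescans by a single
-- enumerate pass keeping (value, index) bests; same return value, simpler shape.

-- ===== PORT A =====
def FindLeftRight (DistanceArray : List Int) : Option Int × Option Int :=
  -- the for-loop building DistPos/DistNeg, as a fold over the same pair of lists
  let pn := DistanceArray.foldl
    (fun (pn : List Int × List Int) Dist =>
      if Dist > 0 then (pn.1 ++ [Dist], pn.2) else (pn.1, pn.2 ++ [Dist]))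
    (([] : List Int), ([] : List Int))
  let RightLaneIdx : Option Int :=
    if pn.2 ≠ [] then
      (PySem.List.max? pn.2 (fun y => y)).bind
        (fun m => (PySem.List.index? DistanceArray m).map (fun (j : Nat) => (j : Int)))
    else none
  let LeftLaneIdx : Option Int :=
    if pn.1 ≠ [] then
      (PySem.List.min? pn.1 (fun y => y)).bind
        (fun m => (PySem.List.index? DistanceArray m).map (fun (j : Nat) => (j : Int)))
    else none
  (LeftLaneIdx, RightLaneIdx)

-- ===== PORT B =====
def FindLeftRight_alt (DistanceArray : List Int) : Option Int × Option Int :=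
  -- single pass over enumerate, bests stored as (value, index)
  let st := (PySem.List.enumerate DistanceArray 0).foldl
    (fun (st : Option (Int × Int) × Option (Int × Int)) (p : Int × Int) =>
      if p.2 > 0 then
        ((match st.1 with
          | none => some (p.2, p.1)
          | some b => if p.2 < b.1 then some (p.2, p.1) else some b), st.2)
      else
        (st.1,
         (match st.2 with
          | none => some (p.2, p.1)
          | some b => if p.2 > b.1 then some (p.2, p.1) else some b)))
    (none, none)
  (st.1.map (fun b => b.2), st.2.map (fun b => b.2))

-- ===== PRECONDITION & SPEC =====
def Spec_FindLeftRight (DistanceArray : List Int) (out : Option Int × Option Int) : Prop := out = FindLeftRight_alt DistanceArray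
instance (DistanceArray : List Int) (out : Option Int × Option Int) : Decidable (Spec_FindLeftRight DistanceArray out) := by unfold Spec_FindLeftRight; infer_instance

-- ===== CLAIM (what is proved, stated in full; the proofs are below) =====
def Claim_equal_FindLeftRight : Prop := ∀ (DistanceArray : List Int), Dom_FindLeftRight DistanceArray → Spec_FindLeftRight DistanceArray (FindLeftRight DistanceArray)

-- ===== LEMMAS AND PROOFS =====

-- generic single-best step over (value, index) pairs: update when the test holds
-- and the key of the new value is strictly below the stored key (first extremal wins)
def gF (t : Int → Bool) (key : Int → Int) (st : Option (Int × Int)) (p : Int × Int) : Option (Int × Int) :=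
  if t p.2 then
    match st with
    | none => some (p.2, p.1)
    | some b => if key p.2 < key b.1 then some (p.2, p.1) else some b
  else st

-- generic value-only best (the fold behind PySem min?/max?)
def gM (key : Int → Int) (o : Option Int) (x : Int) : Option Int :=
  match o with
  | none => some x
  | some m => if key x < key m then some x else some m

def mergeV (key : Int → Int) (o : Option Int) (v : Int) : Option Int :=
  match o with
  | none => some v
  | some c => if key c < key v then some c else some v

def mergeF (key : Int → Int) (o : Option (Int × Int)) (v j : Int) : Option (Int × Int) :=
  match o with
  | none => some (v, j)
  | some c => if key c.1 < key v then some c else some (v, j)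

theorem foldl_gM_some (key : Int → Int) :
    ∀ (l : List Int) (v : Int),
      l.foldl (gM key) (some v) = mergeV key (l.foldl (gM key) none) v := by
  intro l
  induction l with
  | nil => intro v; rfl
  | cons x l ih =>
    intro v
    simp only [List.foldl_cons, show gM key none x = some x from rfl]
    by_cases h : key x < key v
    · rw [show gM key (some v) x = some x from by simp [gM, h], ih x]
      rcases hG : l.foldl (gM key) none with _ | c
      · simp [mergeV, h]
      · by_cases h2 : key c < key x <;> simp only [mergeV, h2, if_true, if_false] <;>
          split_ifs <;> first | rfl | omega
    · rw [show gM key (some v) x = some v from by simp [gM, h], ih v, ih x]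
      rcases hG : l.foldl (gM key) none with _ | c
      · simp [mergeV, h]
      · by_cases h2 : key c < key x <;> simp only [mergeV, h2, if_true, if_false] <;>
          split_ifs <;> first | rfl | omega

theorem foldl_gM_mem (key : Int → Int) :
    ∀ (l : List Int) (m : Int), l.foldl (gM key) none = some m → m ∈ l := by
  intro l
  induction l with
  | nil => intro m h; exact absurd h (by simp)
  | cons x l ih =>
    intro m h
    rw [List.foldl_cons, show gM key none x = some x from rfl, foldl_gM_some key] at h
    rcases hG : l.foldl (gM key) none with _ | c <;> rw [hG] at h <;> simp only [mergeV] at h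
    · simp at h; simp [h]
    · split_ifs at h <;> simp at h
      · exact List.mem_cons_of_mem x (h ▸ ih c hG)
      · simp [h]

theorem foldl_gM_none_iff (key : Int → Int) :
    ∀ (l : List Int), l.foldl (gM key) none = none ↔ l = [] := by
  intro l
  cases l with
  | nil => simp
  | cons x l =>
    simp only [List.foldl_cons, show gM key none x = some x from rfl, foldl_gM_some key]
    rcases hG : l.foldl (gM key) none with _ | c <;> simp [mergeV] <;> split_ifs <;> simp

theorem foldl_gF_some (t : Int → Bool) (key : Int → Int) :
    ∀ (l : List (Int × Int)) (v j : Int),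
      l.foldl (gF t key) (some (v, j)) = mergeF key (l.foldl (gF t key) none) v j := by
  intro l
  induction l with
  | nil => intro v j; rfl
  | cons p l ih =>
    intro v j
    simp only [List.foldl_cons]
    by_cases ht : t p.2
    · rw [show gF t key none p = some (p.2, p.1) from by simp [gF, ht]]
      by_cases h : key p.2 < key v
      · rw [show gF t key (some (v, j)) p = some (p.2, p.1) from by simp [gF, ht, h], ih p.2 p.1]
        rcases hG : l.foldl (gF t key) none with _ | c
        · simp [mergeF, h]
        · by_cases h2 : key c.1 < key p.2 <;> simp only [mergeF, h2, if_true, if_false] <;>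
            split_ifs <;> first | rfl | omega
      · rw [show gF t key (some (v, j)) p = some (v, j) from by simp [gF, ht, h],
          ih v j, ih p.2 p.1]
        rcases hG : l.foldl (gF t key) none with _ | c
        · simp [mergeF, h]
        · by_cases h2 : key c.1 < key p.2 <;> simp only [mergeF, h2, if_true, if_false] <;>
            split_ifs <;> first | rfl | omega
    · rw [show gF t key (some (v, j)) p = some (v, j) from by simp [gF, ht]]
      rw [show gF t key none p = none from by simp [gF, ht]]
      exact ih v j

theorem foldl_gF_none (t : Int → Bool) (key : Int → Int) :
    ∀ (xs : List Int) (i : Int),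
      (PySem.List.enumerate xs i).foldl (gF t key) none =
        ((xs.filter t).foldl (gM key) none).bind
          (fun m => (PySem.List.index? xs m).map (fun (j : Nat) => (m, i + (j : Int)))) := by
  intro xs
  induction xs with
  | nil => intro i; rfl
  | cons x xs ih =>
    intro i
    rw [PySem.List.enumerate_cons, List.foldl_cons]
    by_cases ht : t x
    · rw [show gF t key none (i, x) = some (x, i) from by simp [gF, ht]]
      rw [foldl_gF_some t key, ih (i + 1)]
      rw [List.filter_cons_of_pos ht, List.foldl_cons,
        show gM key none x = some x from rfl, foldl_gM_some key]
      rcases hM : (xs.filter t).foldl (gM key) none with _ | m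
      · simp only [Option.bind_none, Option.bind_some, mergeF, mergeV]
        rw [show PySem.List.index? (x :: xs) x = some 0 from PySem.List.index?_cons_self x xs]
        simp
      · have hmem := List.mem_filter.1 (foldl_gM_mem key _ _ hM)
        obtain ⟨j, hj⟩ := Option.isSome_iff_exists.1
          ((PySem.List.index?_isSome_iff xs m).2 hmem.1)
        simp only [Option.bind_some]
        rw [hj]
        simp only [Option.map_some, mergeF, mergeV]
        by_cases h : key m < key x
        · have hne : x ≠ m := fun he => by rw [he] at h; omega
          rw [if_pos h, if_pos h]
          simp only [Option.bind_some]
          rw [PySem.List.index?_cons_of_ne xs hne, hj]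
          simp only [Option.map_some]
          congr 2
          push_cast
          ring
        · rw [if_neg h, if_neg h]
          simp only [Option.bind_some]
          rw [show PySem.List.index? (x :: xs) x = some 0 from PySem.List.index?_cons_self x xs]
          simp
    · rw [show gF t key none (i, x) = none from by simp [gF, ht]]
      rw [ih (i + 1), List.filter_cons_of_neg (by simpa using ht)]
      rcases hM : (xs.filter t).foldl (gM key) none with _ | m
      · rfl
      · have hmem := List.mem_filter.1 (foldl_gM_mem key _ _ hM)
        have hne : x ≠ m := fun he => by rw [← he] at hmem; rw [hmem.2] at ht; simp at ht
        obtain ⟨j, hj⟩ := Option.isSome_iff_exists.1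
          ((PySem.List.index?_isSome_iff xs m).2 hmem.1)
        simp only [Option.bind_some]
        rw [PySem.List.index?_cons_of_ne xs hne, hj]
        simp only [Option.map_some]
        congr 2
        push_cast
        ring

-- the two concrete tests
def tpos (d : Int) : Bool := decide (0 < d)
def tneg (d : Int) : Bool := !tpos d

theorem min?_eq_gM (l : List Int) :
    PySem.List.min? l (fun y => y) = l.foldl (gM (fun v => v)) none := by
  unfold PySem.List.min?
  congr 1
  funext o x
  rcases o with _ | m <;> rfl

theorem max?_eq_gM (l : List Int) :
    PySem.List.max? l (fun y => y) = l.foldl (gM (fun v => -v)) none := by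
  unfold PySem.List.max?
  congr 1
  funext o x
  rcases o with _ | m
  · rfl
  · simp only [gM, neg_lt_neg_iff]

theorem filter_pos_fold :
    ∀ (l : List Int) (acc : List Int),
      l.foldl (fun acc x => if x > 0 then acc ++ [x] else acc) acc = acc ++ l.filter tpos := by
  intro l
  induction l with
  | nil => intro acc; simp
  | cons x l ih =>
    intro acc
    by_cases h : x > 0 <;> simp [tpos, h, ih, List.append_assoc]

theorem filter_neg_fold :
    ∀ (l : List Int) (acc : List Int),
      l.foldl (fun acc x => if x > 0 then acc else acc ++ [x]) acc = acc ++ l.filter tneg := by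
  intro l
  induction l with
  | nil => intro acc; simp
  | cons x l ih =>
    intro acc
    by_cases h : x > 0 <;> simp [tneg, tpos, h, ih, List.append_assoc]

theorem foldlA_split :
    ∀ (l : List Int) (a b : List Int),
      l.foldl
          (fun (pn : List Int × List Int) Dist =>
            if Dist > 0 then (pn.1 ++ [Dist], pn.2) else (pn.1, pn.2 ++ [Dist]))
          (a, b) =
        (l.foldl (fun acc x => if x > 0 then acc ++ [x] else acc) a,
         l.foldl (fun acc x => if x > 0 then acc else acc ++ [x]) b) := by
  intro l
  induction l with
  | nil => intro a b; rfl
  | cons x l ih =>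
    intro a b
    by_cases h : x > 0 <;> simp only [List.foldl_cons, h, if_true, if_false, ih]

theorem foldlB_split :
    ∀ (l : List (Int × Int)) (s1 s2 : Option (Int × Int)),
      l.foldl
          (fun (st : Option (Int × Int) × Option (Int × Int)) (p : Int × Int) =>
            if p.2 > 0 then
              ((match st.1 with
                | none => some (p.2, p.1)
                | some b => if p.2 < b.1 then some (p.2, p.1) else some b), st.2)
            else
              (st.1,
               (match st.2 with
                | none => some (p.2, p.1)
                | some b => if p.2 > b.1 then some (p.2, p.1) else some b)))
          (s1, s2) =
        (l.foldl (gF tpos (fun v => v)) s1, l.foldl (gF tneg (fun v => -v)) s2) := by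
  intro l
  induction l with
  | nil => intro s1 s2; rfl
  | cons p l ih =>
    intro s1 s2
    simp only [List.foldl_cons]
    by_cases h : p.2 > 0
    · rw [if_pos h]
      have h2 : gF tneg (fun v => -v) s2 p = s2 := by simp [gF, tneg, tpos, h]
      have h1 : gF tpos (fun v => v) s1 p =
          (match s1 with
           | none => some (p.2, p.1)
           | some b => if p.2 < b.1 then some (p.2, p.1) else some b) := by
        rcases s1 with _ | b <;> simp [gF, tpos, h]
      rw [ih, h1, h2]
    · rw [if_neg h]
      have h1 : gF tpos (fun v => v) s1 p = s1 := by simp [gF, tpos, h]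
      have h2 : gF tneg (fun v => -v) s2 p =
          (match s2 with
           | none => some (p.2, p.1)
           | some b => if p.2 > b.1 then some (p.2, p.1) else some b) := by
        rcases s2 with _ | b
        · simp [gF, tneg, tpos, h]
        · have he : ((-p.2 : Int) < -b.1) = (p.2 > b.1) := by
            simp [gt_iff_lt, neg_lt_neg_iff]
          simp only [gF, tneg, tpos, h, decide_false, Bool.not_false, if_true, he]
      rw [ih, h1, h2]

-- ===== VERDICT (by name: the statement is the Claim_ definition above) =====
theorem FindLeftRight_spec : Claim_equal_FindLeftRight := by
  unfold Claim_equal_FindLeftRight Spec_FindLeftRight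
  intro xs _
  show FindLeftRight xs = FindLeftRight_alt xs
  simp only [FindLeftRight, FindLeftRight_alt]
  rw [foldlA_split, foldlB_split, filter_pos_fold, filter_neg_fold,
    List.nil_append, List.nil_append, foldl_gF_none, foldl_gF_none,
    min?_eq_gM, max?_eq_gM]
  refine Prod.ext ?_ ?_
  · rcases hM : (xs.filter tpos).foldl (gM (fun v => v)) none with _ | m
    · have : xs.filter tpos = [] := (foldl_gM_none_iff (fun v => v) _).1 hM
      simp [this]
    · have hne : xs.filter tpos ≠ [] := by
        intro he; rw [he] at hM; simp at hM
      obtain ⟨j, hj⟩ := Option.isSome_iff_exists.1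
        ((PySem.List.index?_isSome_iff xs m).2
          (List.mem_filter.1 (foldl_gM_mem _ _ _ hM)).1)
      have hj' : List.idxOf? m xs = some j := by
        rw [PySem.List.index?_eq_idxOf?] at hj; exact hj
      simp [hne, hj']
  · rcases hM : (xs.filter tneg).foldl (gM (fun v => -v)) none with _ | m
    · have : xs.filter tneg = [] := (foldl_gM_none_iff (fun v => -v) _).1 hM
      simp [this]
    · have hne : xs.filter tneg ≠ [] := by
        intro he; rw [he] at hM; simp at hM
      obtain ⟨j, hj⟩ := Option.isSome_iff_exists.1
        ((PySem.List.index?_isSome_iff xs m).2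
          (List.mem_filter.1 (foldl_gM_mem _ _ _ hM)).1)
      have hj' : List.idxOf? m xs = some j := by
        rw [PySem.List.index?_eq_idxOf?] at hj; exact hj
      simp [hne, hj']
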